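-- pv_equiv track=rewrite | github.com/mostghost/advent_of_code_2025 | daythree/solution pt2.py | candidate_finder
-- ===== SOURCE A (Python) =====
-- def candidate_finder(iter, bank):
--     """
--     This cuts each string down into the searchable portion, then just searches
--     for the presence of each number in order, 9-1 . If the number exists in the str
--     at all, then the first match will make for the largest possible joltage.
--     Then returns that number.
--
--     Returns:
--     str_num: String version of the largest number
--     short_bank: The remainder of the bank, beyond the first instance of the largest num
--     """
--
--     end_index = 12 - iter
--
--     if end_index != 0:
--         bank_short = bank[: -(12 - iter)]
--     else:
--         bank_short = bank
--
--     for i in range(9, 0, -1):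
--         str_num = str(i)
--
--         if str_num in bank_short:
--             found_index = bank.index(str_num)
--             # If there are multiple num, index always returns the first.
--
--             return str_num, bank[found_index + 1 :]
-- ===== SOURCE B (Python) =====
-- def candidate_finder(iter, bank):
--     # Same truncation as the original (exact slice expression), then a single
--     # pass collecting the digit characters '1'..'9' and taking their max.
--     end_index = 12 - iter
--     if end_index != 0:
--         bank_short = bank[: -(12 - iter)]
--     else:
--         bank_short = bank
--
--     digits = [c for c in bank_short if '1' <= c <= '9']
--     if not digits:
--         return None
--     m = max(digits)
--     return m, bank[bank.index(m) + 1:]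
-- ===== Notes on version B (the rewrite author's own statement) =====
-- stated objective: simpler
-- what changed: Replaces the descending loop of nine substring-membership scans (9..1) by a single pass that collects the digit characters '1'..'9' from the truncated string and takes their max.
import Mathlib
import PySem

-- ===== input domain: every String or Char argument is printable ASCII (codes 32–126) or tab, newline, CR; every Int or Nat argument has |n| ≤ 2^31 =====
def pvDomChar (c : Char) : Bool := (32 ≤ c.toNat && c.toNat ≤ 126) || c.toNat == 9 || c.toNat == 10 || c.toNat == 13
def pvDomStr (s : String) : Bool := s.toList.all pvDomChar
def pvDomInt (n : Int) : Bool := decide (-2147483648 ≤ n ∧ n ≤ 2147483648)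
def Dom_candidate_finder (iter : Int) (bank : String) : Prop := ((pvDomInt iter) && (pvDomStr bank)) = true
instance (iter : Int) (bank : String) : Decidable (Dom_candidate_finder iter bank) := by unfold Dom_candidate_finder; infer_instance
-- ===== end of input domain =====

-- B replaces A's nine descending substring-membership scans by ONE pass over the
-- truncated string collecting the digit characters '1'..'9' and taking their max (objective: simpler).

-- ===== PORT A =====
-- the 'for i in range(9, 0, -1): … return …' loop; falling off the end returns None.
-- 'bank.index(str_num)' only runs when str_num occurs in bank_short, a prefix of bank,
-- so it never raises and equals PySem.Chars.find (first occurrence).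
def candidate_finder_loop (bank bank_short : List Char) : List Int → Option (String × String)
  | [] => none
  | i :: rest =>
    let str_num := PySem.Int.toChars i
    if PySem.Chars.isIn str_num bank_short then
      let found_index := PySem.Chars.find bank str_num
      some (String.ofList str_num, String.ofList (PySem.Chars.slice bank (some (found_index + 1)) none))
    else candidate_finder_loop bank bank_short rest

def candidate_finder (iter : Int) (bank : String) : Option (String × String) :=
  let end_index := 12 - iter
  let bank_short :=
    if end_index ≠ 0 then PySem.Chars.slice bank.toList none (some (-(12 - iter)))
    else bank.toList
  candidate_finder_loop bank.toList bank_short (PySem.List.pyRange 9 0 (-1))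

-- ===== PORT B =====
def candidate_finder_alt (iter : Int) (bank : String) : Option (String × String) :=
  let end_index := 12 - iter
  let bank_short :=
    if end_index ≠ 0 then PySem.Chars.slice bank.toList none (some (-(12 - iter)))
    else bank.toList
  let digits := bank_short.filter (fun c => decide ('1' ≤ c ∧ c ≤ '9'))
  match PySem.List.max? digits id with
  | none => none
  | some m =>
      some (String.ofList [m],
            String.ofList (PySem.Chars.slice bank.toList (some (PySem.Chars.find bank.toList [m] + 1)) none))

-- ===== PRECONDITION & SPEC =====
def Spec_candidate_finder (iter : Int) (bank : String) (out : Option (String × String)) : Prop := out = candidate_finder_alt iter bank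
instance (iter : Int) (bank : String) (out : Option (String × String)) : Decidable (Spec_candidate_finder iter bank out) := by unfold Spec_candidate_finder; infer_instance

-- ===== CLAIM (what is proved, stated in full; the proofs are below) =====
def Claim_equal_candidate_finder : Prop := ∀ (iter : Int) (bank : String), Dom_candidate_finder iter bank → Spec_candidate_finder iter bank (candidate_finder iter bank)

-- ===== LEMMAS AND PROOFS =====

lemma digit_cases (m : Char) (h1 : '1' ≤ m) (h9 : m ≤ '9') :
    m = '9' ∨ m = '8' ∨ m = '7' ∨ m = '6' ∨ m = '5' ∨ m = '4' ∨ m = '3' ∨ m = '2' ∨ m = '1' := by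
  have ht : m.toNat = 49 ∨ m.toNat = 50 ∨ m.toNat = 51 ∨ m.toNat = 52 ∨ m.toNat = 53 ∨
      m.toNat = 54 ∨ m.toNat = 55 ∨ m.toNat = 56 ∨ m.toNat = 57 := by
    simp [Char.le_def, UInt32.le_iff_toNat_le] at h1 h9
    omega
  rcases ht with h|h|h|h|h|h|h|h|h <;>
    [right;right;right;right;right;right;right;right;left] <;>
    first
      | (exact Char.ext (UInt32.toNat_inj.mp h))
      | (repeat' first | (left; exact Char.ext (UInt32.toNat_inj.mp h)) | right) <;>
        exact Char.ext (UInt32.toNat_inj.mp h)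

lemma loop_eq (bl bs : List Char) :
    candidate_finder_loop bl bs (PySem.List.pyRange 9 0 (-1)) =
      match PySem.List.max? (bs.filter (fun c => decide ('1' ≤ c ∧ c ≤ '9'))) id with
      | none => none
      | some m =>
          some (String.ofList [m],
                String.ofList (PySem.Chars.slice bl (some (PySem.Chars.find bl [m] + 1)) none)) := by
  have hrange : PySem.List.pyRange 9 0 (-1) = [9, 8, 7, 6, 5, 4, 3, 2, 1] := by decide
  have hc9 : PySem.Int.toChars 9 = ['9'] := by decide
  have hc8 : PySem.Int.toChars 8 = ['8'] := by decide
  have hc7 : PySem.Int.toChars 7 = ['7'] := by decide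
  have hc6 : PySem.Int.toChars 6 = ['6'] := by decide
  have hc5 : PySem.Int.toChars 5 = ['5'] := by decide
  have hc4 : PySem.Int.toChars 4 = ['4'] := by decide
  have hc3 : PySem.Int.toChars 3 = ['3'] := by decide
  have hc2 : PySem.Int.toChars 2 = ['2'] := by decide
  have hc1 : PySem.Int.toChars 1 = ['1'] := by decide
  rw [hrange]
  cases h : PySem.List.max? (bs.filter (fun c => decide ('1' ≤ c ∧ c ≤ '9'))) id with
  | none =>
    have hfil := (PySem.List.max?_eq_none_iff _ id).mp h
    have hnot : ∀ c : Char, '1' ≤ c → c ≤ '9' → c ∉ bs := by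
      intro c hl hr hc
      have : c ∈ bs.filter (fun c => decide ('1' ≤ c ∧ c ≤ '9')) :=
        List.mem_filter.mpr ⟨hc, by simp [hl, hr]⟩
      rw [hfil] at this
      simp at this
    simp [candidate_finder_loop, hc9, hc8, hc7, hc6, hc5, hc4, hc3, hc2, hc1,
      PySem.Chars.isIn_iff_infix, List.singleton_infix_iff,
      hnot '9' (by decide) (by decide), hnot '8' (by decide) (by decide),
      hnot '7' (by decide) (by decide), hnot '6' (by decide) (by decide),
      hnot '5' (by decide) (by decide), hnot '4' (by decide) (by decide),
      hnot '3' (by decide) (by decide), hnot '2' (by decide) (by decide),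
      hnot '1' (by decide) (by decide)]
  | some m =>
    have hmax := PySem.List.max?_isMax h
    have hmemf := PySem.List.max?_mem h
    rw [List.mem_filter] at hmemf
    obtain ⟨hmbs, hmd⟩ := hmemf
    have hmd' : '1' ≤ m ∧ m ≤ '9' := by simpa using hmd
    have hgt : ∀ c : Char, '1' ≤ c → c ≤ '9' → ¬ c ≤ m → c ∉ bs := by
      intro c hl hr hcm hc
      exact hcm (hmax c (List.mem_filter.mpr ⟨hc, by simp [hl, hr]⟩))
    rcases digit_cases m hmd'.1 hmd'.2 with hm|hm|hm|hm|hm|hm|hm|hm|hm <;> subst hm <;>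
      simp [candidate_finder_loop, hc9, hc8, hc7, hc6, hc5, hc4, hc3, hc2, hc1,
        PySem.Chars.isIn_iff_infix, List.singleton_infix_iff, hmbs,
        hgt '9' (by decide) (by decide), hgt '8' (by decide) (by decide),
        hgt '7' (by decide) (by decide), hgt '6' (by decide) (by decide),
        hgt '5' (by decide) (by decide), hgt '4' (by decide) (by decide),
        hgt '3' (by decide) (by decide), hgt '2' (by decide) (by decide)]

-- ===== VERDICT (by name: the statement is the Claim_ definition above) =====
theorem candidate_finder_spec : Claim_equal_candidate_finder := by
  intro iter bank _
  unfold Spec_candidate_finder candidate_finder candidate_finder_alt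
  exact loop_eq _ _
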